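-- pv_equiv track=rewrite | github.com/michaelodusami/py-dsa-mooc | main.py | listSplitsRefined
-- ===== SOURCE A (Python) =====
-- def listSplitsRefined(aList: list):
--     n = len(aList)
--     ways = 0
--     left_sum = 0
--     for i in range(n - 1):
--         left_sum += aList[i]
--         right_sum = sum(aList[i+1:])
--         if left_sum == right_sum:
--             ways += 1
--
--     return ways
-- ===== SOURCE B (Python) =====
-- def listSplitsRefined(aList: list):
--     # Two staged passes: build the list of prefix sums once, then count
--     # the proper prefixes p with 2*p == total (total is the last prefix sum).
--     prefixes = []
--     s = 0
--     for x in aList: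
--         s += x
--         prefixes.append(s)
--     if not prefixes:
--         return 0
--     total = prefixes[-1]
--     return sum(1 for p in prefixes[:-1] if 2 * p == total)
-- ===== Notes on version B (the rewrite author's own statement) =====
-- stated objective: faster
-- what changed: Replaced A's per-index re-summation of the right part (sum(aList[i+1:]) in the loop) by a materialised prefix-sum list built in one pass, followed by a count of the proper prefixes p with 2*p equal to the total (the last prefix sum).
import Mathlib
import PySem

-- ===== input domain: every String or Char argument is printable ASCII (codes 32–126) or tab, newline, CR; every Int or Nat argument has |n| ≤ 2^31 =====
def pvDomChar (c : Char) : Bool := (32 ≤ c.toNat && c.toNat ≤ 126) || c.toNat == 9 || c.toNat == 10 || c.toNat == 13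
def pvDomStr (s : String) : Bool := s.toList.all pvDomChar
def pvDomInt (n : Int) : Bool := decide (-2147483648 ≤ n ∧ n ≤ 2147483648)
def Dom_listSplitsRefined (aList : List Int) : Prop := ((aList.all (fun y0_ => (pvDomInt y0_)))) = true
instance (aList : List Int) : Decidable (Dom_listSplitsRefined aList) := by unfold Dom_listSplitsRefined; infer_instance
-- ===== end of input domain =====

-- B builds the prefix-sum list once, then counts the proper prefixes p with
-- 2*p = total; A re-sums the right part at every index. Return values proved equal.

-- ===== PORT A =====
def listSplitsRefined (aList : List Int) : Int :=
  let n : Int := aList.length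
  (((PySem.List.pyRange 0 (n - 1) 1).foldl
      (fun (st : Int × Int) i =>
        let leftSum := st.2 + PySem.List.pyGetD aList i 0
        let rightSum := (PySem.List.slice aList (some (i + 1)) none).sum
        (if leftSum = rightSum then st.1 + 1 else st.1, leftSum))
      (0, 0))).1

-- ===== PORT B =====
def listSplitsRefined_alt (aList : List Int) : Int :=
  let prefixes := (aList.foldl (fun (st : List Int × Int) x =>
      let s := st.2 + x
      (st.1 ++ [s], s)) ([], 0)).1
  if prefixes = [] then 0
  else
    let total := prefixes.getLast?.getD 0
    ((prefixes.dropLast.countP (fun p => 2 * p == total) : Nat) : Int)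

-- ===== PRECONDITION & SPEC =====
def Spec_listSplitsRefined (aList : List Int) (out : Int) : Prop := out = listSplitsRefined_alt aList
instance (aList : List Int) (out : Int) : Decidable (Spec_listSplitsRefined aList out) := by unfold Spec_listSplitsRefined; infer_instance

-- ===== CLAIM (what is proved, stated in full; the proofs are below) =====
def Claim_equal_listSplitsRefined : Prop := ∀ (aList : List Int), Dom_listSplitsRefined aList → Spec_listSplitsRefined aList (listSplitsRefined aList)

-- ===== LEMMAS AND PROOFS =====

-- recursive characterisation of A's loop
def gA : List Int → Int → Int → Int
  | [], w, _ => w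
  | x :: rest, w, l =>
    if rest = [] then w
    else gA rest (if l + x = rest.sum then w + 1 else w) (l + x)

-- running prefix sums starting from l
def scanSum (l : Int) : List Int → List Int
  | [] => []
  | x :: rest => (l + x) :: scanSum (l + x) rest

lemma gA_short (xs : List Int) (w l : Int) (h : xs.length ≤ 1) : gA xs w l = w := by
  match xs with
  | [] => rfl
  | [x] => rfl
  | x :: y :: t => simp at h

lemma loopA (aList : List Int) : ∀ (k i : Nat), aList.length ≤ i + k →
    ∀ (w l : Int),
    (((PySem.List.pyRange (i : Int) ((aList.length : Int) - 1) 1).foldl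
      (fun (st : Int × Int) j =>
        let leftSum := st.2 + PySem.List.pyGetD aList j 0
        let rightSum := (PySem.List.slice aList (some (j + 1)) none).sum
        (if leftSum = rightSum then st.1 + 1 else st.1, leftSum))
      (w, l))).1 = gA (aList.drop i) w l := by
  intro k
  induction k with
  | zero =>
    intro i hi w l
    rw [PySem.List.pyRange_one_eq_nil (by omega)]
    rw [List.drop_eq_nil_of_le (by omega)]
    rfl
  | succ k ih =>
    intro i hi w l
    by_cases h : (i : Int) < (aList.length : Int) - 1
    · have hi1 : i + 1 < aList.length := by omega
      have hi0 : i < aList.length := by omega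
      rw [PySem.List.pyRange_one_cons h]
      rw [List.foldl_cons]
      have hcast : (i : Int) + 1 = ((i + 1 : Nat) : Int) := by push_cast; ring
      simp only [hcast, PySem.List.pyGetD_natCast, PySem.List.slice_from_natCast]
      rw [ih (i + 1) (by omega)]
      rw [List.drop_eq_getElem_cons hi0]
      have hne : aList.drop (i + 1) ≠ [] := by
        intro hnil
        have := List.length_drop (l := aList) (i := i + 1)
        rw [hnil] at this
        simp at this
        omega
      rw [gA]
      simp [hne, List.getElem?_eq_getElem hi0]
    · rw [PySem.List.pyRange_one_eq_nil (by omega)]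
      rw [gA_short _ _ _ (by simp; omega)]
      rfl

-- B's first pass builds exactly the scanSum list
lemma foldB (xs : List Int) : ∀ (acc : List Int) (s : Int),
    (xs.foldl (fun (st : List Int × Int) x =>
      let t := st.2 + x
      (st.1 ++ [t], t)) (acc, s)) = (acc ++ scanSum s xs, s + xs.sum) := by
  induction xs with
  | nil => intro acc s; simp [scanSum]
  | cons x rest ih =>
    intro acc s
    rw [List.foldl_cons, ih]
    simp [scanSum]
    ring

lemma scanSum_last (xs : List Int) (l : Int) (h : xs ≠ []) :
    (scanSum l xs).getLast?.getD 0 = l + xs.sum := by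
  induction xs generalizing l with
  | nil => exact absurd rfl h
  | cons x rest ih =>
    by_cases hr : rest = []
    · subst hr; simp [scanSum]
    · have hscan : scanSum (l + x) rest ≠ [] := by
        cases rest with
        | nil => exact absurd rfl hr
        | cons y t => simp [scanSum]
      rw [scanSum, List.getLast?_cons]
      cases he : (scanSum (l + x) rest).getLast? with
      | none => exact absurd (List.getLast?_eq_none_iff.mp he) hscan
      | some v =>
        have hv := ih (l + x) hr
        rw [he] at hv
        simp at hv ⊢
        omega

-- counting over proper prefixes equals A's loop recursion
lemma count_eq_gA (xs : List Int) : ∀ (w l total : Int), l + xs.sum = total →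
    gA xs w l = w + (((scanSum l xs).dropLast.countP (fun p => 2 * p == total) : Nat) : Int) := by
  induction xs with
  | nil => intro w l total _; simp [gA, scanSum]
  | cons x rest ih =>
    intro w l total hsum
    by_cases hr : rest = []
    · subst hr; simp [gA, scanSum]
    · have hscan : scanSum (l + x) rest ≠ [] := by
        cases rest with
        | nil => exact absurd rfl hr
        | cons y t => simp [scanSum]
      rw [gA, if_neg hr]
      rw [ih _ _ total (by simp at hsum ⊢; omega)]
      rw [scanSum, List.dropLast_cons_of_ne_nil hscan, List.countP_cons]
      have hcond : (l + x = rest.sum) ↔ (2 * (l + x) = total) := by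
        simp only [List.sum_cons] at hsum
        omega
      by_cases hc : l + x = rest.sum
      · rw [if_pos hc]
        simp only [hcond.mp hc]
        simp only [beq_self_eq_true, if_true]
        push_cast
        ring
      · rw [if_neg hc]
        have : ¬ (2 * (l + x) = total) := fun h => hc (hcond.mpr h)
        simp [this]

-- ===== VERDICT (by name: the statement is the Claim_ definition above) =====
theorem listSplitsRefined_spec : Claim_equal_listSplitsRefined := by
  intro aList _
  unfold Spec_listSplitsRefined listSplitsRefined listSplitsRefined_alt
  simp only [foldB aList [] 0, List.nil_append]
  by_cases hnil : aList = []
  · subst hnil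
    simp [scanSum, PySem.List.pyRange]
  · have hA := loopA aList aList.length 0 (by omega) 0 0
    simp only [Nat.cast_zero, List.drop_zero] at hA
    have hscan : scanSum 0 aList ≠ [] := by
      cases aList with
      | nil => exact absurd rfl hnil
      | cons y t => simp [scanSum]
    rw [if_neg hscan, scanSum_last aList 0 hnil]
    rw [hA, count_eq_gA aList 0 0 (0 + aList.sum) rfl]
    simp
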